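-- pv_equiv track=rewrite | github.com/inspirehep/refextract | refextract/references/engine.py | format_hep
-- ===== SOURCE A (Python) =====
-- def format_hep(citation_elements):
--     """Format hep-th report numbers with a dash
--
--     e.g. replaces hep-th-9711200 with hep-th/9711200
--     """
--     prefixes = ('astro-ph-', 'hep-th-', 'hep-ph-', 'hep-ex-', 'hep-lat-',
--                 'math-ph-')
--     for el in citation_elements:
--         if el['type'] == 'REPORTNUMBER':
--             for p in prefixes:
--                 if el['report_num'].startswith(p):
--                     el['report_num'] = el['report_num'][:len(p) - 1] + '/' + \
--                         el['report_num'][len(p):]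
--     return citation_elements
-- ===== SOURCE B (Python) =====
-- def format_hep(citation_elements):
--     """Format hep-th report numbers with a dash
--
--     e.g. replaces hep-th-9711200 with hep-th/9711200
--     """
--     categories = {'astro-ph', 'hep-th', 'hep-ph', 'hep-ex', 'hep-lat', 'math-ph'}
--     for el in citation_elements:
--         if el['type'] == 'REPORTNUMBER':
--             rn = el['report_num']
--             i = rn.find('-')
--             j = rn.find('-', i + 1)
--             if j != -1 and rn[:j] in categories:
--                 el['report_num'] = rn[:j] + '/' + rn[j + 1:]
--     return citation_elements
-- ===== Notes on version B (the rewrite author's own statement) =====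
-- stated objective: alternative
-- what changed: Instead of scanning a tuple of six dashed prefixes with startswith and splicing at each hit, B locates the second dash with two find() calls and does one set-membership test of the text before it, so the inner loop over prefixes disappears.
import Mathlib
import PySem

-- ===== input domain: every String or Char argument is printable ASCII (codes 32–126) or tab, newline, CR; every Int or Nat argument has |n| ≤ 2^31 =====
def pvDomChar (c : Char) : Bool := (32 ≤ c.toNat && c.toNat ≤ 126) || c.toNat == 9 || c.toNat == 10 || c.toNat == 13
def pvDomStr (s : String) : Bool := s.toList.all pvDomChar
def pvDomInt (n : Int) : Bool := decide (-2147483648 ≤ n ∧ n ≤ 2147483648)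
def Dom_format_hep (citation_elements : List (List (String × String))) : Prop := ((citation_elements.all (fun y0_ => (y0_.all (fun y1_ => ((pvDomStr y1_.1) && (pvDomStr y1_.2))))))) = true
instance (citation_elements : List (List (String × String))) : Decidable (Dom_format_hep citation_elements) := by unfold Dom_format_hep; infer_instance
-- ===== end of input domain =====

-- B replaces A's inner scan over six dashed prefixes by locating the second dash (two find calls)
-- and one set-membership test of the text before it.  The Python functions mutate the element dicts
-- in place and return the same list; the equivalence proved here is about the return value.

-- ===== PORT A =====
def pvPrefixes : List String := ["astro-ph-", "hep-th-", "hep-ph-", "hep-ex-", "hep-lat-", "math-ph-"]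

-- one pass of A's inner 'for p in prefixes' loop (re-reads el['report_num'] each time, like A)
def pvStepA (el : PySem.Dict String String) (p : String) : PySem.Dict String String :=
  let rn := el.getD "report_num" ""
  if PySem.Str.startswith rn p then
    el.insert "report_num"
      (PySem.Str.slice rn none (some ((PySem.Str.len p : Int) - 1)) ++ "/" ++
        PySem.Str.slice rn (some (PySem.Str.len p : Int)) none)
  else el

def format_hep (citation_elements : List (List (String × String))) : List (List (String × String)) :=
  citation_elements.map (fun el =>
    -- el['type'] / el['report_num']: KeyError (Python raises) is excluded by Pre_; getD's default "" is never "REPORTNUMBER"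
    if (PySem.Dict.mk el).getD "type" "" = "REPORTNUMBER" then
      (pvPrefixes.foldl pvStepA (PySem.Dict.mk el)).items
    else el)

-- ===== PORT B =====
def pvCats : PySem.Set String := PySem.Set.ofList ["astro-ph", "hep-th", "hep-ph", "hep-ex", "hep-lat", "math-ph"]

def format_hep_alt (citation_elements : List (List (String × String))) : List (List (String × String)) :=
  citation_elements.map (fun el =>
    if (PySem.Dict.mk el).getD "type" "" = "REPORTNUMBER" then
      let rn := (PySem.Dict.mk el).getD "report_num" ""
      let i := PySem.Str.find rn "-"
      let j := PySem.Str.findFrom rn "-" (i + 1)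
      if j ≠ -1 ∧ PySem.Set.contains pvCats (PySem.Str.slice rn none (some j)) = true then
        ((PySem.Dict.mk el).insert "report_num"
          (PySem.Str.slice rn none (some j) ++ "/" ++ PySem.Str.slice rn (some (j + 1)) none)).items
      else el
    else el)

-- ===== PRECONDITION & SPEC =====
-- Pre_ excludes exactly the inputs where the Python raises KeyError: an element without a 'type'
-- key, or a 'REPORTNUMBER' element without a 'report_num' key (both A and B raise there).
def Pre_format_hep (citation_elements : List (List (String × String))) : Prop :=
  ∀ el ∈ citation_elements,
    (PySem.Dict.mk el).contains "type" = true ∧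
    ((PySem.Dict.mk el).getD "type" "" = "REPORTNUMBER" → (PySem.Dict.mk el).contains "report_num" = true)
instance (citation_elements : List (List (String × String))) : Decidable (Pre_format_hep citation_elements) := by unfold Pre_format_hep; infer_instance

def pvWitness_format_hep : (List (List (String × String))) :=
  [[("type", "REPORTNUMBER"), ("report_num", "hep-th-9711200")], [("type", "JOURNAL")]]

def Spec_format_hep (citation_elements : List (List (String × String))) (out : List (List (String × String))) : Prop := out = format_hep_alt citation_elements
instance (citation_elements : List (List (String × String))) (out : List (List (String × String))) : Decidable (Spec_format_hep citation_elements out) := by unfold Spec_format_hep; infer_instance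

-- ===== CLAIM (what is proved, stated in full; the proofs are below) =====
def Claim_equal_format_hep : Prop := ∀ (citation_elements : List (List (String × String))), Dom_format_hep citation_elements → Pre_format_hep citation_elements → Spec_format_hep citation_elements (format_hep citation_elements)

-- ===== LEMMAS AND PROOFS =====

-- find.go on a string whose first dash follows 'pre'
theorem pvGoDash (pre rest : List Char) (k : Nat) (h : '-' ∉ pre) :
    PySem.Chars.find.go ['-'] (pre ++ '-' :: rest) k = (k : Int) + pre.length := by
  induction pre generalizing k with
  | nil => simp [PySem.Chars.find.go, List.isPrefixOf]
  | cons c t ih =>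
    simp only [List.mem_cons, not_or] at h
    simp only [List.cons_append, PySem.Chars.find.go, List.isPrefixOf]
    rw [if_neg (by simp [h.1]), ih (k + 1) h.2]
    simp; omega

theorem pvFindDash (pre rest : List Char) (h : '-' ∉ pre) :
    PySem.Chars.find (pre ++ '-' :: rest) ['-'] = pre.length := by
  simpa [PySem.Chars.find] using pvGoDash pre rest 0 h

-- B's find/find/slice computations on a string of the shape pre1 ++ '-' ++ pre2 ++ '-' ++ rest
theorem pvBSide (rn : String) (pre1 pre2 rest : List Char)
    (h1 : '-' ∉ pre1) (h2 : '-' ∉ pre2)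
    (hcs : rn.toList = pre1 ++ '-' :: (pre2 ++ '-' :: rest)) :
    PySem.Str.find rn "-" = pre1.length ∧
    PySem.Str.findFrom rn "-" ((pre1.length : Int) + 1) = (pre1.length : Int) + 1 + pre2.length ∧
    PySem.Str.slice rn none (some ((pre1.length : Int) + 1 + pre2.length)) = String.ofList (pre1 ++ '-' :: pre2) := by
  have hfind : PySem.Str.find rn "-" = pre1.length := by
    have := pvFindDash pre1 (pre2 ++ '-' :: rest) h1
    simpa [hcs] using this
  refine ⟨hfind, ?_, ?_⟩
  · have hk : pre1.length + 1 ≤ rn.toList.length := by simp [hcs]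
    have h5 := PySem.Chars.findFrom_natCast rn.toList ['-'] (pre1.length + 1) hk
    have hdrop : rn.toList.drop (pre1.length + 1) = pre2 ++ '-' :: rest := by
      rw [hcs]
      rw [show pre1 ++ '-' :: (pre2 ++ '-' :: rest) = (pre1 ++ ['-']) ++ (pre2 ++ '-' :: rest) by simp]
      rw [List.drop_append_of_le_length (by simp)]
      simp
    rw [hdrop, pvFindDash pre2 rest h2] at h5
    rw [if_neg (by omega)] at h5
    simp only [PySem.Str.findFrom_eq]
    push_cast at h5
    exact h5
  · apply String.toList_inj.mp
    simp only [PySem.Str.slice, PySem.Chars.slice_eq_listSlice, String.toList_ofList]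
    rw [PySem.List.slice_to _ (by positivity)]
    rw [show ((pre1.length : Int) + 1 + pre2.length).toNat = pre1.length + 1 + pre2.length by omega]
    rw [hcs]
    rw [show pre1 ++ '-' :: (pre2 ++ '-' :: rest) = (pre1 ++ '-' :: pre2) ++ ('-' :: rest) by simp]
    rw [show pre1.length + 1 + pre2.length = (pre1 ++ '-' :: pre2).length by simp; omega]
    rw [List.take_append_of_le_length (by simp)]
    simp

-- the shared shape of both ports' per-element branch, proved by cases on which prefix
-- (if any) rn = el['report_num'] starts with
theorem pvMain (d : PySem.Dict String String) (rn : String) (hrn : d.getD "report_num" "" = rn) :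
    (pvPrefixes.foldl pvStepA d).items =
    (if PySem.Str.findFrom rn "-" (PySem.Str.find rn "-" + 1) ≠ -1 ∧
        PySem.Set.contains pvCats (PySem.Str.slice rn none (some (PySem.Str.findFrom rn "-" (PySem.Str.find rn "-" + 1)))) = true then
      (d.insert "report_num"
        (PySem.Str.slice rn none (some (PySem.Str.findFrom rn "-" (PySem.Str.find rn "-" + 1))) ++ "/" ++
          PySem.Str.slice rn (some (PySem.Str.findFrom rn "-" (PySem.Str.find rn "-" + 1) + 1)) none)).items
    else d.items) := by
  by_cases hA0 : PySem.Str.startswith rn "astro-ph-" = true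
  · obtain ⟨rest, hrest⟩ := (PySem.Chars.startswith_iff _ _).mp (by simpa using hA0)
    have hcs : rn.toList = ['a','s','t','r','o'] ++ '-' :: (['p','h'] ++ '-' :: rest) := by rw [← hrest]; rfl
    obtain ⟨hf, hff, hsl⟩ := pvBSide rn ['a','s','t','r','o'] ['p','h'] rest (by decide) (by decide) hcs
    simp only [show ((['a','s','t','r','o'].length : Nat) : Int) = 5 from rfl,
      show ((['p','h'].length : Nat) : Int) = 2 from rfl] at hf hff hsl
    norm_num only at hff hsl
    have hslcat : PySem.Str.slice rn none (some 8) = "astro-ph" := by rw [hsl]; decide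
    have hdr : (PySem.Str.slice rn (some 9) none).toList = rest := by
      simp [PySem.Str.slice, PySem.Chars.slice_eq_listSlice,
        PySem.List.slice_from _ (by norm_num : (0:Int) ≤ 9), hcs]
    rw [hf, show (5:Int)+1 = 6 from by norm_num, hff,
      if_pos (show (8:Int) ≠ -1 ∧ PySem.Set.contains pvCats (PySem.Str.slice rn none (some 8)) = true from
        ⟨by norm_num, by rw [hslcat]; decide⟩),
      show (8:Int)+1 = 9 from by norm_num]
    simp [pvPrefixes, pvStepA, hrn, PySem.Dict.getD_insert_self, hcs, hslcat, hdr,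
      PySem.Chars.startswith, List.isPrefixOf,
      show ((9:Int))-1 = 8 from by norm_num]
  rw [Bool.not_eq_true] at hA0
  by_cases hA1 : PySem.Str.startswith rn "hep-th-" = true
  · obtain ⟨rest, hrest⟩ := (PySem.Chars.startswith_iff _ _).mp (by simpa using hA1)
    have hcs : rn.toList = ['h','e','p'] ++ '-' :: (['t','h'] ++ '-' :: rest) := by rw [← hrest]; rfl
    obtain ⟨hf, hff, hsl⟩ := pvBSide rn ['h','e','p'] ['t','h'] rest (by decide) (by decide) hcs
    simp only [show ((['h','e','p'].length : Nat) : Int) = 3 from rfl,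
      show ((['t','h'].length : Nat) : Int) = 2 from rfl] at hf hff hsl
    norm_num only at hff hsl
    have hslcat : PySem.Str.slice rn none (some 6) = "hep-th" := by rw [hsl]; decide
    have hdr : (PySem.Str.slice rn (some 7) none).toList = rest := by
      simp [PySem.Str.slice, PySem.Chars.slice_eq_listSlice,
        PySem.List.slice_from _ (by norm_num : (0:Int) ≤ 7), hcs]
    rw [hf, show (3:Int)+1 = 4 from by norm_num, hff,
      if_pos (show (6:Int) ≠ -1 ∧ PySem.Set.contains pvCats (PySem.Str.slice rn none (some 6)) = true from
        ⟨by norm_num, by rw [hslcat]; decide⟩),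
      show (6:Int)+1 = 7 from by norm_num]
    simp [pvPrefixes, pvStepA, hrn, PySem.Dict.getD_insert_self, hcs, hslcat, hdr,
      PySem.Chars.startswith, List.isPrefixOf,
      show ((7:Int))-1 = 6 from by norm_num]
  rw [Bool.not_eq_true] at hA1
  by_cases hA2 : PySem.Str.startswith rn "hep-ph-" = true
  · obtain ⟨rest, hrest⟩ := (PySem.Chars.startswith_iff _ _).mp (by simpa using hA2)
    have hcs : rn.toList = ['h','e','p'] ++ '-' :: (['p','h'] ++ '-' :: rest) := by rw [← hrest]; rfl
    obtain ⟨hf, hff, hsl⟩ := pvBSide rn ['h','e','p'] ['p','h'] rest (by decide) (by decide) hcs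
    simp only [show ((['h','e','p'].length : Nat) : Int) = 3 from rfl,
      show ((['p','h'].length : Nat) : Int) = 2 from rfl] at hf hff hsl
    norm_num only at hff hsl
    have hslcat : PySem.Str.slice rn none (some 6) = "hep-ph" := by rw [hsl]; decide
    have hdr : (PySem.Str.slice rn (some 7) none).toList = rest := by
      simp [PySem.Str.slice, PySem.Chars.slice_eq_listSlice,
        PySem.List.slice_from _ (by norm_num : (0:Int) ≤ 7), hcs]
    rw [hf, show (3:Int)+1 = 4 from by norm_num, hff,
      if_pos (show (6:Int) ≠ -1 ∧ PySem.Set.contains pvCats (PySem.Str.slice rn none (some 6)) = true from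
        ⟨by norm_num, by rw [hslcat]; decide⟩),
      show (6:Int)+1 = 7 from by norm_num]
    simp [pvPrefixes, pvStepA, hrn, PySem.Dict.getD_insert_self, hcs, hslcat, hdr,
      PySem.Chars.startswith, List.isPrefixOf,
      show ((7:Int))-1 = 6 from by norm_num]
  rw [Bool.not_eq_true] at hA2
  by_cases hA3 : PySem.Str.startswith rn "hep-ex-" = true
  · obtain ⟨rest, hrest⟩ := (PySem.Chars.startswith_iff _ _).mp (by simpa using hA3)
    have hcs : rn.toList = ['h','e','p'] ++ '-' :: (['e','x'] ++ '-' :: rest) := by rw [← hrest]; rfl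
    obtain ⟨hf, hff, hsl⟩ := pvBSide rn ['h','e','p'] ['e','x'] rest (by decide) (by decide) hcs
    simp only [show ((['h','e','p'].length : Nat) : Int) = 3 from rfl,
      show ((['e','x'].length : Nat) : Int) = 2 from rfl] at hf hff hsl
    norm_num only at hff hsl
    have hslcat : PySem.Str.slice rn none (some 6) = "hep-ex" := by rw [hsl]; decide
    have hdr : (PySem.Str.slice rn (some 7) none).toList = rest := by
      simp [PySem.Str.slice, PySem.Chars.slice_eq_listSlice,
        PySem.List.slice_from _ (by norm_num : (0:Int) ≤ 7), hcs]
    rw [hf, show (3:Int)+1 = 4 from by norm_num, hff,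
      if_pos (show (6:Int) ≠ -1 ∧ PySem.Set.contains pvCats (PySem.Str.slice rn none (some 6)) = true from
        ⟨by norm_num, by rw [hslcat]; decide⟩),
      show (6:Int)+1 = 7 from by norm_num]
    simp [pvPrefixes, pvStepA, hrn, PySem.Dict.getD_insert_self, hcs, hslcat, hdr,
      PySem.Chars.startswith, List.isPrefixOf,
      show ((7:Int))-1 = 6 from by norm_num]
  rw [Bool.not_eq_true] at hA3
  by_cases hA4 : PySem.Str.startswith rn "hep-lat-" = true
  · obtain ⟨rest, hrest⟩ := (PySem.Chars.startswith_iff _ _).mp (by simpa using hA4)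
    have hcs : rn.toList = ['h','e','p'] ++ '-' :: (['l','a','t'] ++ '-' :: rest) := by rw [← hrest]; rfl
    obtain ⟨hf, hff, hsl⟩ := pvBSide rn ['h','e','p'] ['l','a','t'] rest (by decide) (by decide) hcs
    simp only [show ((['h','e','p'].length : Nat) : Int) = 3 from rfl,
      show ((['l','a','t'].length : Nat) : Int) = 3 from rfl] at hf hff hsl
    norm_num only at hff hsl
    have hslcat : PySem.Str.slice rn none (some 7) = "hep-lat" := by rw [hsl]; decide
    have hdr : (PySem.Str.slice rn (some 8) none).toList = rest := by
      simp [PySem.Str.slice, PySem.Chars.slice_eq_listSlice,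
        PySem.List.slice_from _ (by norm_num : (0:Int) ≤ 8), hcs]
    rw [hf, show (3:Int)+1 = 4 from by norm_num, hff,
      if_pos (show (7:Int) ≠ -1 ∧ PySem.Set.contains pvCats (PySem.Str.slice rn none (some 7)) = true from
        ⟨by norm_num, by rw [hslcat]; decide⟩),
      show (7:Int)+1 = 8 from by norm_num]
    simp [pvPrefixes, pvStepA, hrn, PySem.Dict.getD_insert_self, hcs, hslcat, hdr,
      PySem.Chars.startswith, List.isPrefixOf,
      show ((8:Int))-1 = 7 from by norm_num]
  rw [Bool.not_eq_true] at hA4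
  by_cases hA5 : PySem.Str.startswith rn "math-ph-" = true
  · obtain ⟨rest, hrest⟩ := (PySem.Chars.startswith_iff _ _).mp (by simpa using hA5)
    have hcs : rn.toList = ['m','a','t','h'] ++ '-' :: (['p','h'] ++ '-' :: rest) := by rw [← hrest]; rfl
    obtain ⟨hf, hff, hsl⟩ := pvBSide rn ['m','a','t','h'] ['p','h'] rest (by decide) (by decide) hcs
    simp only [show ((['m','a','t','h'].length : Nat) : Int) = 4 from rfl,
      show ((['p','h'].length : Nat) : Int) = 2 from rfl] at hf hff hsl
    norm_num only at hff hsl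
    have hslcat : PySem.Str.slice rn none (some 7) = "math-ph" := by rw [hsl]; decide
    have hdr : (PySem.Str.slice rn (some 8) none).toList = rest := by
      simp [PySem.Str.slice, PySem.Chars.slice_eq_listSlice,
        PySem.List.slice_from _ (by norm_num : (0:Int) ≤ 8), hcs]
    rw [hf, show (4:Int)+1 = 5 from by norm_num, hff,
      if_pos (show (7:Int) ≠ -1 ∧ PySem.Set.contains pvCats (PySem.Str.slice rn none (some 7)) = true from
        ⟨by norm_num, by rw [hslcat]; decide⟩),
      show (7:Int)+1 = 8 from by norm_num]
    simp [pvPrefixes, pvStepA, hrn, hcs, hslcat,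
      PySem.Chars.startswith, List.isPrefixOf,
      show ((8:Int))-1 = 7 from by norm_num]
  rw [Bool.not_eq_true] at hA5
  -- no prefix matches: A leaves the element alone; B's guard is false too
  rw [if_neg ?hcond]
  · 
    have hA0C : PySem.Chars.startswith rn.toList ['a','s','t','r','o','-','p','h','-'] = false := by simpa using hA0
    have hA1C : PySem.Chars.startswith rn.toList ['h','e','p','-','t','h','-'] = false := by simpa using hA1
    have hA2C : PySem.Chars.startswith rn.toList ['h','e','p','-','p','h','-'] = false := by simpa using hA2
    have hA3C : PySem.Chars.startswith rn.toList ['h','e','p','-','e','x','-'] = false := by simpa using hA3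
    have hA4C : PySem.Chars.startswith rn.toList ['h','e','p','-','l','a','t','-'] = false := by simpa using hA4
    have hA5C : PySem.Chars.startswith rn.toList ['m','a','t','h','-','p','h','-'] = false := by simpa using hA5
    simp [pvPrefixes, pvStepA, hrn, hA0C, hA1C, hA2C, hA3C, hA4C, hA5C]
  case hcond =>
    rintro ⟨hjne, hmem⟩
    have hjneC : PySem.Chars.findFrom rn.toList ['-'] (PySem.Chars.find rn.toList ['-'] + 1) ≠ -1 := by simpa using hjne
    have hmemC : PySem.Set.contains pvCats (PySem.Str.slice rn none (some (PySem.Chars.findFrom rn.toList ['-'] (PySem.Chars.find rn.toList ['-'] + 1)))) = true := by simpa using hmem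
    by_cases hi : PySem.Chars.find rn.toList ['-'] = -1
    · apply hjneC
      rw [hi, show (-1:Int)+1 = 0 from by norm_num, PySem.Chars.findFrom_zero]
      exact hi
    · have hi0 : 0 ≤ PySem.Chars.find rn.toList ['-'] := by
        have h1 := PySem.Chars.neg_one_le_find rn.toList ['-']
        omega
      have hspec := PySem.Chars.find_spec (s := rn.toList) (sub := ['-']) hi0
      have hlt : (PySem.Chars.find rn.toList ['-']).toNat < rn.toList.length := by
        rcases hspec.1 with ⟨t0, ht0⟩
        have h2 : rn.toList.drop (PySem.Chars.find rn.toList ['-']).toNat ≠ [] := by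
          rw [← ht0]; simp
        by_contra hge
        rw [not_lt] at hge
        exact h2 (List.drop_eq_nil_of_le hge)
      have hk : (PySem.Chars.find rn.toList ['-']).toNat + 1 ≤ rn.toList.length := hlt
      have harg : ((((PySem.Chars.find rn.toList ['-']).toNat + 1 : Nat)) : Int) = PySem.Chars.find rn.toList ['-'] + 1 := by
        push_cast; omega
      rw [← harg] at hjneC hmemC
      have hjs := PySem.Chars.findFrom_natCast_spec rn.toList ['-'] _ hk hjneC
      set j := PySem.Chars.findFrom rn.toList ['-'] ((((PySem.Chars.find rn.toList ['-']).toNat + 1 : Nat)) : Int) with hjdef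
      have hj0 : (0:Int) ≤ j := le_trans (by positivity) hjs.1
      obtain ⟨t, ht⟩ := hjs.2.1
      have htake : rn.toList = rn.toList.take j.toNat ++ '-' :: t := by
        conv_lhs => rw [← List.take_append_drop j.toNat rn.toList]
        rw [← ht]
        simp
      have hsl' : (PySem.Str.slice rn none (some j)).toList = rn.toList.take j.toNat := by
        simp [PySem.Str.slice, PySem.Chars.slice_eq_listSlice, PySem.List.slice_to _ hj0]
      have hx : PySem.Str.slice rn none (some j) ∈ (["astro-ph", "hep-th", "hep-ph", "hep-ex", "hep-lat", "math-ph"] : List String) := by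
        have h3 := hmemC
        rw [show pvCats = (["astro-ph", "hep-th", "hep-ph", "hep-ex", "hep-lat", "math-ph"] : List String) from by decide] at h3
        simpa [PySem.Set.contains] using h3
      simp only [List.mem_cons, List.not_mem_nil, or_false] at hx
      rcases hx with hx | hx
      · have hcat : rn.toList.take j.toNat = "astro-ph".toList := by rw [← hsl', hx]
        have hsw : PySem.Str.startswith rn "astro-ph-" = true := by
          have hp : ("astro-ph-".toList) <+: rn.toList := ⟨t, by rw [htake, hcat]; simp⟩
          simpa using (PySem.Chars.startswith_iff rn.toList "astro-ph-".toList).mpr hp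
        rw [hA0] at hsw
        simp at hsw
      rcases hx with hx | hx
      · have hcat : rn.toList.take j.toNat = "hep-th".toList := by rw [← hsl', hx]
        have hsw : PySem.Str.startswith rn "hep-th-" = true := by
          have hp : ("hep-th-".toList) <+: rn.toList := ⟨t, by rw [htake, hcat]; simp⟩
          simpa using (PySem.Chars.startswith_iff rn.toList "hep-th-".toList).mpr hp
        rw [hA1] at hsw
        simp at hsw
      rcases hx with hx | hx
      · have hcat : rn.toList.take j.toNat = "hep-ph".toList := by rw [← hsl', hx]
        have hsw : PySem.Str.startswith rn "hep-ph-" = true := by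
          have hp : ("hep-ph-".toList) <+: rn.toList := ⟨t, by rw [htake, hcat]; simp⟩
          simpa using (PySem.Chars.startswith_iff rn.toList "hep-ph-".toList).mpr hp
        rw [hA2] at hsw
        simp at hsw
      rcases hx with hx | hx
      · have hcat : rn.toList.take j.toNat = "hep-ex".toList := by rw [← hsl', hx]
        have hsw : PySem.Str.startswith rn "hep-ex-" = true := by
          have hp : ("hep-ex-".toList) <+: rn.toList := ⟨t, by rw [htake, hcat]; simp⟩
          simpa using (PySem.Chars.startswith_iff rn.toList "hep-ex-".toList).mpr hp
        rw [hA3] at hsw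
        simp at hsw
      rcases hx with hx | hx
      · have hcat : rn.toList.take j.toNat = "hep-lat".toList := by rw [← hsl', hx]
        have hsw : PySem.Str.startswith rn "hep-lat-" = true := by
          have hp : ("hep-lat-".toList) <+: rn.toList := ⟨t, by rw [htake, hcat]; simp⟩
          simpa using (PySem.Chars.startswith_iff rn.toList "hep-lat-".toList).mpr hp
        rw [hA4] at hsw
        simp at hsw
      · have hcat : rn.toList.take j.toNat = "math-ph".toList := by rw [← hsl', hx]
        have hsw : PySem.Str.startswith rn "math-ph-" = true := by
          have hp : ("math-ph-".toList) <+: rn.toList := ⟨t, by rw [htake, hcat]; simp⟩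
          simpa using (PySem.Chars.startswith_iff rn.toList "math-ph-".toList).mpr hp
        rw [hA5] at hsw
        simp at hsw

theorem pvElem (el : List (String × String)) :
    (if (PySem.Dict.mk el).getD "type" "" = "REPORTNUMBER" then
      (pvPrefixes.foldl pvStepA (PySem.Dict.mk el)).items
    else el) =
    (if (PySem.Dict.mk el).getD "type" "" = "REPORTNUMBER" then
      let rn := (PySem.Dict.mk el).getD "report_num" ""
      let i := PySem.Str.find rn "-"
      let j := PySem.Str.findFrom rn "-" (i + 1)
      if j ≠ -1 ∧ PySem.Set.contains pvCats (PySem.Str.slice rn none (some j)) = true then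
        ((PySem.Dict.mk el).insert "report_num"
          (PySem.Str.slice rn none (some j) ++ "/" ++ PySem.Str.slice rn (some (j + 1)) none)).items
      else el
    else el) := by
  by_cases ht : (PySem.Dict.mk el).getD "type" "" = "REPORTNUMBER"
  · simp only [ht, if_true]
    exact pvMain (PySem.Dict.mk el) _ rfl
  · simp [ht]

-- ===== VERDICT (by name: the statement is the Claim_ definition above) =====
theorem format_hep_spec : Claim_equal_format_hep := by
  intro ce _ _
  unfold Spec_format_hep format_hep format_hep_alt
  exact List.map_congr_left fun el _ => pvElem el
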